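-- pv_equiv track=rewrite | github.com/benjamindelmee/obstinate-requests | obstinate/_obstinate.py | _code_in_list
-- ===== SOURCE A (Python) =====
-- def _code_in_list(code, codelist):
--     """Tells if `code` is contained in `codelist`
--
--     Examples:
--         - 401 is not contained in ['3xx', '404', '5xx']
--         - 404 is contained in ['3xx', '404', '5xx']
--         - 503 is contained in ['3xx', '404', '5xx']
--     """
--
--     # status codes to exclude
--     exact_codes = [code for code in codelist if 'x' not in code]
--
--     if str(code) in exact_codes:
--         return True
--
--     # classes of status code to exclude
--     class_codes = [code[0] for code in codelist if 'x' in code]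
--
--     if str(code)[0] in class_codes:
--         return True
--
--     return False
-- ===== SOURCE B (Python) =====
-- def _code_in_list(code, codelist):
--     s = str(code)
--     for pattern in codelist:
--         if 'x' in pattern:
--             if s[0] == pattern[0]:
--                 return True
--         elif s == pattern:
--             return True
--     return False
-- ===== Notes on version B (the rewrite author's own statement) =====
-- stated objective: simpler
-- what changed: Replaces the two filtered-list builds plus two membership scans with a single short-circuiting loop over codelist that tests each pattern directly.
import Mathlib
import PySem

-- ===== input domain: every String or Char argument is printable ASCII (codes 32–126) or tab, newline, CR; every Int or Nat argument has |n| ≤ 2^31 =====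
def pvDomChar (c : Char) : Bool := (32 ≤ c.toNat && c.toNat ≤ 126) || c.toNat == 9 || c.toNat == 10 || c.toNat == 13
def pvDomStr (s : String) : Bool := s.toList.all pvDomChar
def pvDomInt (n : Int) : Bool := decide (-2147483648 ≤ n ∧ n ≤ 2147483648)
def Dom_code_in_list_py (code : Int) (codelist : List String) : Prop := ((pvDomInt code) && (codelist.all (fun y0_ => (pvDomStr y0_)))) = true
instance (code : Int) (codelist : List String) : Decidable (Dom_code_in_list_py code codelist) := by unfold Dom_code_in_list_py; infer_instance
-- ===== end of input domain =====

-- ===== PORT A =====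
def code_in_list_py (code : Int) (codelist : List String) : Bool :=
  let exact_codes := codelist.filter (fun p => !('x' ∈ p.toList))
  if PySem.Int.toStr code ∈ exact_codes then true
  else
    let class_codes := (codelist.filter (fun p => 'x' ∈ p.toList)).map (fun p => p.toList.head?)
    if (PySem.Int.toChars code).head? ∈ class_codes then true
    else false

-- ===== PORT B =====
-- B: one pass over codelist, short-circuiting per pattern (simpler decomposition, same cost)
def codeInListGo (s : String) (codelist : List String) : Bool :=
  match codelist with
  | [] => false
  | p :: rest =>
    if 'x' ∈ p.toList then
      if s.toList.head? = p.toList.head? then true else codeInListGo s rest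
    else if s = p then true
    else codeInListGo s rest

def code_in_list_py_alt (code : Int) (codelist : List String) : Bool :=
  codeInListGo (PySem.Int.toStr code) codelist

-- ===== PRECONDITION & SPEC =====
def Spec_code_in_list_py (code : Int) (codelist : List String) (out : Bool) : Prop := out = code_in_list_py_alt code codelist
instance (code : Int) (codelist : List String) (out : Bool) : Decidable (Spec_code_in_list_py code codelist out) := by unfold Spec_code_in_list_py; infer_instance

-- ===== CLAIM (what is proved, stated in full; the proofs are below) =====
def Claim_equal_code_in_list_py : Prop := ∀ (code : Int) (codelist : List String), Dom_code_in_list_py code codelist → Spec_code_in_list_py code codelist (code_in_list_py code codelist)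

-- ===== LEMMAS AND PROOFS =====

-- ===== VERDICT (by name: the statement is the Claim_ definition above) =====
lemma codeInListGo_iff (s : String) (l : List String) :
    codeInListGo s l = true ↔
      (s ∈ l.filter (fun p => !('x' ∈ p.toList)) ∨
        s.toList.head? ∈ (l.filter (fun p => 'x' ∈ p.toList)).map (fun p => p.toList.head?)) := by
  induction l with
  | nil => simp [codeInListGo]
  | cons p rest ih =>
    by_cases hx : 'x' ∈ p.toList <;>
      simp only [codeInListGo, List.filter_cons, hx, decide_true, decide_false,
        Bool.not_true, Bool.not_false, if_true, if_false, List.map_cons, List.mem_cons] <;>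
      split_ifs <;> simp_all

theorem code_in_list_py_spec : Claim_equal_code_in_list_py := by
  intro code codelist _
  unfold Spec_code_in_list_py code_in_list_py code_in_list_py_alt
  rw [Bool.eq_iff_iff, codeInListGo_iff, PySem.Int.toList_toStr]
  dsimp only
  split_ifs <;> simp_all
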